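-- pv_equiv track=rewrite | github.com/RuthanGudd/Python_kurs | Sekcja 14/test84.py | count_task_frequency
-- ===== SOURCE A (Python) =====
-- def count_task_frequency(tasks):
--     completedTasksPerUser = dict()
--     for record in tasks:
--         if (record['completed']) == True:
--             try:
--                 completedTasksPerUser[record["userId"]] += 1
--             except KeyError:
--                 completedTasksPerUser[record["userId"]] = 1
--
--     return completedTasksPerUser
-- ===== SOURCE B (Python) =====
-- def count_task_frequency(tasks):
--     ids = [record["userId"] for record in tasks if record["completed"] == True]
--     return {u: ids.count(u) for u in ids}
-- ===== Notes on version B (the rewrite author's own statement) =====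
-- stated objective: alternative
-- what changed: Replaces the incremental dict accumulation with try/except by a two-phase shape: a comprehension collecting the userIds of completed records, then a counting dict-comprehension over that list.
import Mathlib
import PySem

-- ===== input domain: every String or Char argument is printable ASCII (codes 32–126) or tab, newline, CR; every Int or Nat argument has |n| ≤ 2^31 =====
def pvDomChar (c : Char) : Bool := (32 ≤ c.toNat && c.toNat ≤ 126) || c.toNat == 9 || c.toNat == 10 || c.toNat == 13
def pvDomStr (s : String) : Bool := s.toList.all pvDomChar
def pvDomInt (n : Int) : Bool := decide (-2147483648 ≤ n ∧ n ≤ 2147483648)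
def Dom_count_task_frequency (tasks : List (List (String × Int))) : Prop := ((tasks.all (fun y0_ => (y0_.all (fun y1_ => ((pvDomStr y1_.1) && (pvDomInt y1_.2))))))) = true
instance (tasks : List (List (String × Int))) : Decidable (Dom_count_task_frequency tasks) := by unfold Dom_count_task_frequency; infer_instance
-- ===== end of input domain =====

-- B replaces A's incremental try/except dict accumulation by filtering the completed userIds
-- first and then building the result with a counting dict-comprehension (alternative decomposition).


-- ===== PORT A =====
-- record['k'] on a dict parameter given as an association list
def recGet (r : List (String × Int)) (k : String) : Option Int :=
  PySem.Dict.get? (PySem.Dict.mk r) k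

def count_task_frequency (tasks : List (List (String × Int))) : List (Int × Int) :=
  (tasks.foldl (fun d r =>
    if recGet r "completed" == some 1 then
      match recGet r "userId" with
      | some u =>
        -- try: d[u] += 1 / except KeyError: d[u] = 1
        match PySem.Dict.get? d u with
        | some v => PySem.Dict.insert d u (v + 1)
        | none => PySem.Dict.insert d u 1
      | none => d   -- Python raises KeyError here; excluded by Pre_
    else d) PySem.Dict.empty).items

-- ===== PORT B =====
def count_task_frequency_alt (tasks : List (List (String × Int))) : List (Int × Int) :=
  let ids : List Int :=
    (tasks.filter (fun r => recGet r "completed" == some 1)).filterMap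
      (fun r => recGet r "userId")   -- none = KeyError; excluded by Pre_
  (ids.foldl (fun d u => PySem.Dict.insert d u ((PySem.List.count ids u : Nat) : Int))
    PySem.Dict.empty).items

-- ===== PRECONDITION & SPEC =====
-- Pre_ excludes exactly the inputs on which A raises KeyError: a record without a
-- 'completed' key, or a completed record without a 'userId' key.
def Pre_count_task_frequency (tasks : List (List (String × Int))) : Prop :=
  ∀ r ∈ tasks, (recGet r "completed").isSome = true ∧
    (recGet r "completed" = some 1 → (recGet r "userId").isSome = true)
instance (tasks : List (List (String × Int))) : Decidable (Pre_count_task_frequency tasks) := by unfold Pre_count_task_frequency; infer_instance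
def pvWitness_count_task_frequency : (List (List (String × Int))) :=
  [[("completed", 1), ("userId", 5)], [("completed", 0)], [("completed", 1), ("userId", 5)]]
def Spec_count_task_frequency (tasks : List (List (String × Int))) (out : List (Int × Int)) : Prop := out = count_task_frequency_alt tasks
instance (tasks : List (List (String × Int))) (out : List (Int × Int)) : Decidable (Spec_count_task_frequency tasks out) := by unfold Spec_count_task_frequency; infer_instance

-- ===== CLAIM (what is proved, stated in full; the proofs are below) =====
def Claim_equal_count_task_frequency : Prop := ∀ (tasks : List (List (String × Int))), Dom_count_task_frequency tasks → Pre_count_task_frequency tasks → Spec_count_task_frequency tasks (count_task_frequency tasks)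

-- ===== LEMMAS AND PROOFS =====

-- A's loop over tasks, restricted to Pre_, is the Counter loop over the completed ids.
theorem foldA_eq (tasks : List (List (String × Int)))
    (h : Pre_count_task_frequency tasks) (d : PySem.Dict Int Int) :
    tasks.foldl (fun d r =>
      if recGet r "completed" == some 1 then
        match recGet r "userId" with
        | some u =>
          match PySem.Dict.get? d u with
          | some v => PySem.Dict.insert d u (v + 1)
          | none => PySem.Dict.insert d u 1
        | none => d
      else d) d
    = ((tasks.filter (fun r => recGet r "completed" == some 1)).filterMap
        (fun r => recGet r "userId")).foldl
        (fun d u => PySem.Dict.insert d u (PySem.Dict.getD d u 0 + 1)) d := by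
  induction tasks generalizing d with
  | nil => rfl
  | cons r rest ih =>
    have hr := h r (by simp)
    have hrest : Pre_count_task_frequency rest := fun x hx => h x (by simp [hx])
    by_cases hc : recGet r "completed" = some 1
    · obtain ⟨u, hu⟩ := Option.isSome_iff_exists.mp (hr.2 hc)
      simp only [List.foldl_cons, List.filter_cons, hc, hu]
      simp only [beq_self_eq_true, if_true, List.filterMap_cons, hu, List.foldl_cons]
      rw [ih hrest _]
      congr 1
      rw [PySem.Dict.getD_eq_get?_getD]
      cases hg : PySem.Dict.get? d u <;> simp
    · simp only [List.foldl_cons, List.filter_cons]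
      have hc' : (recGet r "completed" == some 1) = false := by
        simp [hc]
      simp only [hc', if_false, Bool.false_eq_true]
      exact ih hrest d

-- B's loop: inserting each id with its (fixed) total count, starting from a dict whose
-- items are already (key, c key) for distinct keys, yields (keys ∪ l).map (k, c k).
theorem foldB_items (c : Int → Int) (l : List Int) (d : PySem.Dict Int Int)
    (hnd : d.keys.Nodup) (hitems : d.items = d.keys.map (fun k => (k, c k))) :
    (l.foldl (fun d u => PySem.Dict.insert d u (c u)) d).items
    = (PySem.Set.update d.keys l).map (fun k => (k, c k)) := by
  induction l generalizing d with
  | nil => simpa [PySem.Set.update] using hitems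
  | cons u rest ih =>
    simp only [List.foldl_cons]
    by_cases hcont : PySem.Dict.contains d u = true
    · have hmem : u ∈ d.keys := (PySem.Dict.contains_iff_mem_keys d u).mp hcont
      have hins : (PySem.Dict.insert d u (c u)).items = d.items := by
        rw [PySem.Dict.items_insert_of_contains d (c u) hcont, hitems]
        rw [List.map_map]
        apply List.map_congr_left
        intro k hk
        by_cases hku : k = u <;> simp [hku]
      have hkeys : (PySem.Dict.insert d u (c u)).keys = d.keys :=
        PySem.Dict.keys_insert_of_contains d (c u) hcont
      rw [ih (PySem.Dict.insert d u (c u)) (by rw [hkeys]; exact hnd)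
        (by rw [hins, hkeys, hitems])]
      rw [hkeys]
      simp [PySem.Set.update, PySem.Set.add, PySem.Set.contains, hmem]
    · have hcont' : PySem.Dict.contains d u = false := by
        simpa using hcont
      have hmem : u ∉ d.keys := fun hm =>
        absurd ((PySem.Dict.contains_iff_mem_keys d u).mpr hm) (by simp [hcont'])
      have hins : (PySem.Dict.insert d u (c u)).items = d.items ++ [(u, c u)] :=
        PySem.Dict.items_insert_of_not_contains d (c u) hcont'
      have hkeys : (PySem.Dict.insert d u (c u)).keys = d.keys ++ [u] :=
        PySem.Dict.keys_insert_of_not_contains d (c u) hcont'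
      rw [ih (PySem.Dict.insert d u (c u))
        (by rw [hkeys]; exact List.Nodup.append hnd (List.nodup_singleton u) (List.disjoint_singleton.mpr hmem))
        (by rw [hins, hkeys, hitems]; simp)]
      rw [hkeys]
      simp [PySem.Set.update, PySem.Set.add, PySem.Set.contains, hmem]

-- ===== VERDICT (by name: the statement is the Claim_ definition above) =====
theorem count_task_frequency_spec : Claim_equal_count_task_frequency := by
  intro tasks _ hpre
  unfold Spec_count_task_frequency count_task_frequency count_task_frequency_alt
  rw [foldA_eq tasks hpre]
  rw [PySem.Dict.foldl_insert_getD_add_one_eq_counter, PySem.Dict.items_counter]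
  rw [foldB_items (fun u =>
      ((PySem.List.count ((tasks.filter (fun r => recGet r "completed" == some 1)).filterMap
        (fun r => recGet r "userId")) u : Nat) : Int))
      ((tasks.filter (fun r => recGet r "completed" == some 1)).filterMap
        (fun r => recGet r "userId")) PySem.Dict.empty
      (by simp [PySem.Dict.empty, PySem.Dict.keys])
      (by simp [PySem.Dict.empty, PySem.Dict.keys])]
  simp [PySem.Set.update, PySem.Set.ofList_eq_foldl, PySem.List.count,
    PySem.Dict.empty, PySem.Dict.keys]
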